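-- pv_equiv track=rewrite | github.com/Percy08-dev/kyopro_python | ABC/ABC259/c.py | RLE_sim
-- ===== SOURCE A (Python) =====
-- def RLE_sim(s):
--     i = 1
--     res = [s[0]]
--
--     while i < len(s):
--         x = res[-1]
--
--         if x == s[i]:
--             d = 0
--             while i+d < len(s) and x == s[i+d]:
--                 d += 1
--
--             if d > 0:
--                 res.append(x)
--                 if i+d < len(s):
--                     res.append(s[i+d])
--                 i += d
--         else:
--             res.append(s[i])
--
--         i += 1
--
--
--
--     return "".join(res)
-- ===== SOURCE B (Python) =====
-- def RLE_sim(s):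
--     prev = s[0]
--     res = [prev]
--     run = 1
--     for ch in s[1:]:
--         if ch == prev:
--             run += 1
--             if run == 2:
--                 res.append(ch)
--         else:
--             prev = ch
--             run = 1
--             res.append(ch)
--     return "".join(res)
-- ===== Notes on version B (the rewrite author's own statement) =====
-- stated objective: simpler
-- what changed: Replaced A's index-jumping outer while with an inner run-scanning while and look-ahead appends by a single flat pass over s[1:] maintaining (prev, run) and appending a character only when its run length is 1 or 2.
import Mathlib
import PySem

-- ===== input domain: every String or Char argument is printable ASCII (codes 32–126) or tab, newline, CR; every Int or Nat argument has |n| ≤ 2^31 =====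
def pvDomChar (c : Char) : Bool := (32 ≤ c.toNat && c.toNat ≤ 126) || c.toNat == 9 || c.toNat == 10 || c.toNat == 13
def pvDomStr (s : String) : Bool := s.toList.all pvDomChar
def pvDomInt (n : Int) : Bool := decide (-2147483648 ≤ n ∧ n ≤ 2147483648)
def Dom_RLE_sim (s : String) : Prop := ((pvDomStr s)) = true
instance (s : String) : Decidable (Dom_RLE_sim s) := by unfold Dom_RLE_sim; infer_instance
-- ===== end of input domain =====

-- B replaces A's index-jumping outer while + inner run-scanning while + look-ahead appends
-- by a single flat pass maintaining (prev, run); objective: simpler. A=B proved for s ≠ "".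

-- ===== PORT A =====
-- inner loop: 'while i+d < len(s) and x == s[i+d]: d += 1'
def pvScanRun (cs : List Char) (x : Char) (i : Nat) (d : Nat) : Nat :=
  if i + d < cs.length ∧ x = cs.getD (i + d) default then
    pvScanRun cs x i (d + 1)
  else d
termination_by cs.length - (i + d)
decreasing_by omega

-- outer loop: 'while i < len(s)'; res kept in append order, res[-1] = getLast?
def pvLoopA (cs : List Char) (i : Nat) (res : List Char) : List Char :=
  if _h : i < cs.length then
    let x := res.getLast?.getD default
    if x = cs.getD i default then
      let d := pvScanRun cs x i 0
      if 0 < d then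
        let res1 := res ++ [x]
        let res2 := if i + d < cs.length then res1 ++ [cs.getD (i + d) default] else res1
        pvLoopA cs (i + d + 1) res2
      else
        pvLoopA cs (i + 1) res
    else
      pvLoopA cs (i + 1) (res ++ [cs.getD i default])
  else res
termination_by cs.length - i
decreasing_by all_goals omega

def RLE_sim (s : String) : String :=
  match s.toList with
  | [] => ""            -- Python raises IndexError at s[0]; excluded by Pre_RLE_sim
  | c :: _ => String.ofList (pvLoopA s.toList 1 [c])

-- ===== PORT B =====
-- one step of the 'for ch in s[1:]' loop, state (prev, run, res)
def pvStepB (st : Char × Nat × List Char) (ch : Char) : Char × Nat × List Char :=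
  if ch = st.1 then
    (st.1, st.2.1 + 1, if st.2.1 + 1 = 2 then st.2.2 ++ [ch] else st.2.2)
  else
    (ch, 1, st.2.2 ++ [ch])

def RLE_sim_alt (s : String) : String :=
  match s.toList with
  | [] => ""            -- Python raises IndexError at s[0]; excluded by Pre_RLE_sim
  | c :: rest => String.ofList ((rest.foldl pvStepB (c, 1, [c])).2.2)

-- ===== PRECONDITION & SPEC =====
-- Pre_ excludes only the empty string, on which A raises IndexError at s[0] (B raises there too).
def Pre_RLE_sim (s : String) : Prop := s ≠ ""
instance (s : String) : Decidable (Pre_RLE_sim s) := by unfold Pre_RLE_sim; infer_instance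
def pvWitness_RLE_sim : String := "aab"

def Spec_RLE_sim (s : String) (out : String) : Prop := out = RLE_sim_alt s
instance (s : String) (out : String) : Decidable (Spec_RLE_sim s out) := by unfold Spec_RLE_sim; infer_instance

-- ===== CLAIM (what is proved, stated in full; the proofs are below) =====
def Claim_equal_RLE_sim : Prop := ∀ (s : String), Dom_RLE_sim s → Pre_RLE_sim s → Spec_RLE_sim s (RLE_sim s)

-- ===== LEMMAS AND PROOFS =====

-- recursive form of B's fold
def pvLoopB (l : List Char) (prev : Char) (run : Nat) (res : List Char) : List Char :=
  match l with
  | [] => res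
  | ch :: t =>
    if ch = prev then pvLoopB t prev (run + 1) (if run + 1 = 2 then res ++ [ch] else res)
    else pvLoopB t ch 1 (res ++ [ch])

theorem pvFoldB_eq (l : List Char) : ∀ prev run res,
    (l.foldl pvStepB (prev, run, res)).2.2 = pvLoopB l prev run res := by
  induction l with
  | nil => intro prev run res; rfl
  | cons ch t ih =>
    intro prev run res
    simp only [List.foldl_cons, pvStepB, pvLoopB]
    by_cases h : ch = prev
    · simp [h, ih]
    · simp [h, ih]

-- the inner scan counts the leading run of x in the suffix
theorem pvScanRun_eq (cs : List Char) (x : Char) (i : Nat) : ∀ d,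
    pvScanRun cs x i d = d + ((cs.drop (i + d)).takeWhile (fun c => c == x)).length := by
  intro d
  fun_induction pvScanRun cs x i d with
  | case1 d h ih =>
    obtain ⟨hlt, hx⟩ := h
    have hg : cs[i + d] = x := by
      rw [← List.getD_eq_getElem cs default hlt]; exact hx.symm
    rw [show i + (d + 1) = i + d + 1 from by omega] at ih
    rw [ih, List.drop_eq_getElem_cons hlt, List.takeWhile_cons]
    simp [hg]
    omega
  | case2 d h =>
    by_cases hlt : i + d < cs.length
    · have hx : ¬ x = cs.getD (i + d) default := fun he => h ⟨hlt, he⟩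
      have hg : ¬ cs[i + d] = x := by
        intro he; exact hx (by rw [List.getD_eq_getElem cs default hlt, he])
      rw [List.drop_eq_getElem_cons hlt, List.takeWhile_cons]
      simp [hg]
    · rw [List.drop_eq_nil_of_le (by omega)]
      simp

-- run ≥ 2: a run of prev appends nothing and only bumps the counter
theorem pvLoopB_rep (x : Char) : ∀ k t res m,
    pvLoopB (List.replicate k x ++ t) x (m + 2) res = pvLoopB t x (m + 2 + k) res := by
  intro k
  induction k with
  | zero => intro t res m; simp
  | succ k ih =>
    intro t res m
    simp only [List.replicate_succ, List.cons_append, pvLoopB]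
    have h2 : ¬ (m + 2 + 1 = 2) := by omega
    rw [if_neg h2]
    have := ih t res (m + 1)
    have e1 : m + 1 + 2 = m + 2 + 1 := by omega
    have e2 : m + 1 + 2 + k = m + 2 + (k + 1) := by omega
    rw [e1, e2] at this
    exact this

-- every element of the takeWhile prefix equals x
theorem pvTakeWhile_replicate (l : List Char) (x : Char) :
    l.takeWhile (fun c => c == x) = List.replicate (l.takeWhile (fun c => c == x)).length x := by
  apply List.eq_replicate_of_mem
  intro a ha
  have := List.mem_takeWhile_imp ha
  simpa using this

-- head of dropWhile fails the predicate
theorem pvDropWhile_head (l : List Char) (x y : Char) (t : List Char)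
    (h : l.dropWhile (fun c => c == x) = y :: t) : y ≠ x := by
  induction l with
  | nil => simp at h
  | cons a l ih =>
    rw [List.dropWhile_cons] at h
    by_cases ha : (a == x) = true
    · rw [if_pos ha] at h; exact ih h
    · rw [if_neg ha] at h
      injection h with h1 _
      subst h1
      simpa using ha

-- MAIN: A's outer loop equals B's flat loop with run counter 1, over the remaining suffix
theorem pvMain (cs : List Char) : ∀ n i res x, cs.length - i ≤ n → res.getLast? = some x →
    pvLoopA cs i res = pvLoopB (cs.drop i) x 1 res := by
  intro n
  induction n with
  | zero =>
    intro i res x hn hl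
    have hge : cs.length ≤ i := by omega
    rw [pvLoopA, dif_neg (by omega), List.drop_eq_nil_of_le hge]
    rfl
  | succ n ih =>
    intro i res x hn hl
    by_cases hi : i < cs.length
    · have hdrop : cs.drop i = cs[i] :: cs.drop (i + 1) := List.drop_eq_getElem_cons hi
      have hgd : cs.getD i default = cs[i] := List.getD_eq_getElem cs default hi
      rw [pvLoopA, dif_pos hi]
      simp only [hl, Option.getD_some]
      by_cases hx : x = cs.getD i default
      · -- equal branch: cs[i] = x, A scans the whole run
        rw [if_pos hx]
        set d := pvScanRun cs x i 0 with hd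
        have hdval : d = ((cs.drop i).takeWhile (fun c => c == x)).length := by
          rw [hd, pvScanRun_eq]; simp
        have hhead : (cs[i] == x) = true := by simp [hgd ▸ hx.symm]
        have hdpos : 0 < d := by
          rw [hdval, hdrop, List.takeWhile_cons, hhead]
          simp
        rw [if_pos hdpos]
        -- decompose the suffix: drop i = replicate d x ++ dropWhile …
        have hsplit : cs.drop i
            = List.replicate d x ++ (cs.drop i).dropWhile (fun c => c == x) := by
          conv_lhs => rw [← List.takeWhile_append_dropWhile (p := fun c => c == x) (l := cs.drop i)]
          congr 1
          rw [pvTakeWhile_replicate, ← hdval]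
        set t' := (cs.drop i).dropWhile (fun c => c == x) with ht'
        have ht'drop : t' = cs.drop (i + d) := by
          have : cs.drop (i + d) = (cs.drop i).drop d := by
            rw [List.drop_drop, Nat.add_comm]
          rw [this, hsplit]
          rw [List.drop_append_of_le_length (by simp)]
          simp
        -- B over the run: one append of x, counter climbs
        obtain ⟨d', hd'⟩ : ∃ d', d = d' + 1 := ⟨d - 1, by omega⟩
        have hB : pvLoopB (cs.drop i) x 1 res = pvLoopB t' x (2 + d') (res ++ [x]) := by
          rw [hsplit, hd', List.replicate_succ, List.cons_append]
          simp only [pvLoopB]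
          norm_num
          simpa using pvLoopB_rep x d' t' (res ++ [x]) 0
        rw [hB]
        -- length of the run cannot pass the end
        have hdle : i + d ≤ cs.length := by
          have : d ≤ (cs.drop i).length := hdval ▸ (List.takeWhile_sublist _).length_le
          simp at this; omega
        by_cases hend : i + d < cs.length
        · -- run followed by a different char cs[i+d]
          rw [if_pos hend]
          have hgd2 : cs.getD (i + d) default = cs[i + d] := List.getD_eq_getElem cs default hend
          have ht'cons : t' = cs[i + d] :: cs.drop (i + d + 1) := by
            rw [ht'drop]; exact List.drop_eq_getElem_cons hend
          have hne : cs[i + d] ≠ x := pvDropWhile_head (cs.drop i) x _ _ (ht'.symm.trans ht'cons)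
          rw [ht'cons]
          simp only [pvLoopB, if_neg hne]
          rw [hgd2]
          have hrec := ih (i + d + 1) (res ++ [x] ++ [cs[i + d]]) cs[i + d]
              (by omega) (by simp)
          rw [hrec]
        · -- run reaches the end of the string
          rw [if_neg hend]
          have ht'nil : t' = [] := by
            rw [ht'drop, List.drop_eq_nil_of_le (by omega)]
          rw [ht'nil]
          simp only [pvLoopB]
          rw [pvLoopA, dif_neg (by omega)]
      · -- differing char: plain append, advance one
        rw [if_neg hx]
        rw [hdrop]
        have hne : cs[i] ≠ x := fun he => hx (by rw [hgd, he])
        simp only [pvLoopB, if_neg hne]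
        rw [hgd]
        exact ih (i + 1) (res ++ [cs[i]]) cs[i] (by omega) (by simp)
    · rw [pvLoopA, dif_neg hi, List.drop_eq_nil_of_le (by omega)]
      rfl

-- ===== VERDICT (by name: the statement is the Claim_ definition above) =====
theorem RLE_sim_spec : Claim_equal_RLE_sim := by
  intro s _ hpre
  unfold Spec_RLE_sim
  cases hs : s.toList with
  | nil =>
    exact absurd (String.toList_eq_nil_iff.mp hs) hpre
  | cons c rest =>
    simp only [RLE_sim, RLE_sim_alt, hs]
    have := pvMain (c :: rest) (c :: rest).length 1 [c] c (by omega) (by simp)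
    simp only [List.drop_one, List.tail_cons] at this
    rw [this, pvFoldB_eq]
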